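-- pv_equiv track=rewrite | github.com/mshonichev/tiden_examples | apps/gatling/gatling.py | _get_scenarios_files
-- ===== SOURCE A (Python) =====
-- from copy import deepcopy
--
-- def _get_scenarios_files(results):
--     scenario_files = {}
--     all_data = {
--         node_id: node_data.rstrip().splitlines() for node_id, node_data in results.items()
--     }
--     if not all_data:
--         return {}
--     scenario_count = 0
--     scenario_names = {}
--     scenario_data = {}
--     for node_id, node_data in all_data.items():
--         node_scenario_dirnames = {}
--         for filepath in node_data:
--             if '/' not in filepath:
--                 continue
--             dir_name, filename = filepath.split('/')
--             if dir_name not in node_scenario_dirnames.keys():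
--                 node_scenario_dirnames[dir_name] = []
--             node_scenario_dirnames[dir_name].append('results/' + dir_name + '/' + filename)
--         node_scenario_count = len(node_scenario_dirnames)
--         if scenario_count < node_scenario_count:
--             scenario_count = node_scenario_count
--         for scenario_n, dir_name in enumerate(node_scenario_dirnames):
--             if scenario_n not in scenario_names:
--                 scenario_names[scenario_n] = []
--             scenario_names[scenario_n].append(dir_name)
--             if scenario_n not in scenario_data:
--                 scenario_data[scenario_n] = {}
--             scenario_data[scenario_n][node_id] = node_scenario_dirnames[dir_name].copy()
--
--     for scenario_n, scenario_node_names in scenario_names.items():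
--         min_timestamp = None
--         scenario_name = None
--         for scenario_node_name in scenario_node_names:
--             if '-' not in scenario_node_name:
--                 continue
--             node_scenario_name, node_timestamp = scenario_node_name.split('-')
--             if scenario_name is None:
--                 scenario_name = node_scenario_name
--             else:
--                 if scenario_name != node_scenario_name:
--                     continue
--             if min_timestamp is None:
--                 min_timestamp = node_timestamp
--             else:
--                 if int(min_timestamp) > int(node_timestamp):
--                     min_timestamp = node_timestamp
--         if scenario_name is None:
--             continue
--         scenario_name = scenario_name + '-' + min_timestamp
--         scenario_files[scenario_name] = deepcopy(scenario_data[scenario_n])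
--
--     return scenario_files
-- ===== SOURCE B (Python) =====
-- def _node_table(node_data):
--     pairs = []
--     for fp in node_data.rstrip().splitlines():
--         if '/' in fp:
--             d, f = fp.split('/')
--             pairs.append((d, 'results/' + d + '/' + f))
--     dirs = list(dict.fromkeys(d for d, _ in pairs))
--     return [(d, [p for q, p in pairs if q == d]) for d in dirs]
--
--
-- def _pick(column):
--     valid = []
--     for name in column:
--         if '-' in name:
--             p, t = name.split('-')
--             valid.append((p, t))
--     if not valid:
--         return None
--     prefix = valid[0][0]
--     matched = [t for p, t in valid if p == prefix]
--     ts = matched[0]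
--     for t in matched[1:]:
--         if int(ts) > int(t):
--             ts = t
--     return prefix + '-' + ts
--
--
-- def _get_scenarios_files(results):
--     tables = [(node_id, _node_table(data)) for node_id, data in results.items()]
--     if not tables:
--         return {}
--     width = max(len(t) for _, t in tables)
--     out = {}
--     for i in range(width):
--         name = _pick([t[i][0] for _, t in tables if i < len(t)])
--         if name is None:
--             continue
--         out[name] = {node_id: list(t[i][1]) for node_id, t in tables if i < len(t)}
--     return out
-- ===== Notes on version B (the rewrite author's own statement) =====
-- stated objective: alternative
-- what changed: B first builds an ordered per-node (dir, files) table via filter+dedup+group instead of A's incremental dict, then transposes by positional index and, per column, extracts the valid (prefix, timestamp) pairs in one pass before taking the running int-minimum over the first prefix's matches, replacing A's interleaved index-keyed dicts-of-dicts and single mixed scan.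
import Mathlib
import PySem

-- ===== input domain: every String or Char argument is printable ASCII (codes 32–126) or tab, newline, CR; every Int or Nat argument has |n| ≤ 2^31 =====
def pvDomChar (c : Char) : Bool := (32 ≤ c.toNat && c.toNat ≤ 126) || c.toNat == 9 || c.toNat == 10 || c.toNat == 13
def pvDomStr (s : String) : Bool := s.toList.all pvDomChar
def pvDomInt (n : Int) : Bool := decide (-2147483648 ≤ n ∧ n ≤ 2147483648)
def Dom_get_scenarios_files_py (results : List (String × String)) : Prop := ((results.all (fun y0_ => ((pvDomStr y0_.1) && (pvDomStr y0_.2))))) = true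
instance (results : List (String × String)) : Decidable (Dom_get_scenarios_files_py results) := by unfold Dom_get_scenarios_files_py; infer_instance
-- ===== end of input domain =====

-- B re-decomposes A: it first builds per-node (dir, files) tables, then aggregates column-wise
-- (first valid prefix + running minimum-by-int timestamp) in separate passes, instead of A's
-- interleaved index-keyed dicts-of-dicts; objective: alternative decomposition, same cost.
-- A's deepcopy/.copy are value-copies only; neither implementation mutates its argument.

-- ===== PORT A =====
-- min_timestamp update: if int(min) > int(ts): min = ts   (int() totalised by getD 0; exact under Pre_)
def pyUpdMin (mt : Option String) (t : String) : Option String :=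
  match mt with
  | none => some t
  | some m => if (PySem.Int.ofStr? m).getD 0 > (PySem.Int.ofStr? t).getD 0 then some t else some m

-- body of A's per-file loop building node_scenario_dirnames (split('/') totalised by getD; exact under Pre_)
def pyAddFile (d : PySem.Dict String (List String)) (fp : String) : PySem.Dict String (List String) :=
  if PySem.Str.isIn "/" fp = false then d
  else
    let parts := (PySem.Str.split? fp "/").getD []
    let dir_name := parts.getD 0 ""
    let filename := parts.getD 1 ""
    let d1 := if d.contains dir_name then d else d.insert dir_name []
    d1.insert dir_name (d1.getD dir_name [] ++ ["results/" ++ dir_name ++ "/" ++ filename])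

-- A's scenario_name / min_timestamp scan over one scenario_names[n] list
def pyScan (names : List String) : Option String × Option String :=
  names.foldl (fun st nm =>
    if PySem.Str.isIn "-" nm = false then st
    else
      let parts := (PySem.Str.split? nm "-").getD []
      let pre := parts.getD 0 ""
      let ts := parts.getD 1 ""
      match st.1 with
      | none => (some pre, pyUpdMin st.2 ts)
      | some p => if p ≠ pre then st else (some p, pyUpdMin st.2 ts)) (none, none)

-- body of A's per-node loop updating (scenario_names, scenario_data)
def pyNodeStep (st : PySem.Dict Int (List String) × PySem.Dict Int (PySem.Dict String (List String)))
    (node : String × List String) :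
    PySem.Dict Int (List String) × PySem.Dict Int (PySem.Dict String (List String)) :=
  let nsd := node.2.foldl pyAddFile PySem.Dict.empty
  (PySem.List.enumerate nsd.keys 0).foldl (fun st p =>
    let names1 := if st.1.contains p.1 then st.1 else st.1.insert p.1 []
    let names2 := names1.insert p.1 (names1.getD p.1 [] ++ [p.2])
    let data1 := if st.2.contains p.1 then st.2 else st.2.insert p.1 PySem.Dict.empty
    let data2 := data1.insert p.1 ((data1.getD p.1 PySem.Dict.empty).insert node.1 (nsd.getD p.2 []))
    (names2, data2)) st

-- body of A's final loop emitting scenario_files entries (deepcopy is a value copy here)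
def pyEmit (data : PySem.Dict Int (PySem.Dict String (List String)))
    (out : PySem.Dict String (PySem.Dict String (List String))) (pr : Int × List String) :
    PySem.Dict String (PySem.Dict String (List String)) :=
  let sc := pyScan pr.2
  match sc.1 with
  | none => out
  | some nm => out.insert (nm ++ "-" ++ sc.2.getD "") (data.getD pr.1 PySem.Dict.empty)

-- transliteration of A (the unused local scenario_count is dead code and not carried)
def get_scenarios_files_py (results : List (String × String)) : List (String × List (String × List String)) :=
  let all_data := (PySem.Dict.ofList results).items.map (fun p => (p.1, PySem.Str.splitlines (PySem.Str.rstrip p.2)))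
  if all_data = [] then []
  else
    let st := all_data.foldl pyNodeStep
      ((PySem.Dict.empty : PySem.Dict Int (List String)), (PySem.Dict.empty : PySem.Dict Int (PySem.Dict String (List String))))
    let files := st.1.items.foldl (pyEmit st.2)
      (PySem.Dict.empty : PySem.Dict String (PySem.Dict String (List String)))
    files.items.map (fun p => (p.1, p.2.items))

-- ===== PORT B =====
-- per-node ordered table of (dir_name, rebuilt file paths)
def altNodeTable (node_data : String) : List (String × List String) :=
  let pairs := (PySem.Str.splitlines (PySem.Str.rstrip node_data)).foldl (fun acc fp =>
      if PySem.Str.isIn "/" fp then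
        let parts := (PySem.Str.split? fp "/").getD []
        acc ++ [(parts.getD 0 "", "results/" ++ parts.getD 0 "" ++ "/" ++ parts.getD 1 "")]
      else acc) []
  (PySem.List.dedup (pairs.map (·.1))).map (fun d => (d, (pairs.filter (fun q => q.1 == d)).map (·.2)))

-- scenario name for one column: first '-'-named prefix + running minimum timestamp (compared as int,
-- fold over matched[1:] starting from matched[0]; int() totalised by getD 0, exact under Pre_)
def altPick (column : List String) : Option String :=
  let valid := column.foldl (fun acc nm =>
      if PySem.Str.isIn "-" nm then
        let parts := (PySem.Str.split? nm "-").getD []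
        acc ++ [(parts.getD 0 "", parts.getD 1 "")]
      else acc) []
  match valid with
  | [] => none
  | v :: _ =>
    let matched := (valid.filter (fun q => q.1 == v.1)).map (·.2)
    let ts := matched.tail.foldl
      (fun m t => if (PySem.Int.ofStr? m).getD 0 > (PySem.Int.ofStr? t).getD 0 then t else m)
      (matched.headD "")
    some (v.1 ++ "-" ++ ts)

def get_scenarios_files_py_alt (results : List (String × String)) : List (String × List (String × List String)) :=
  let tables := (PySem.Dict.ofList results).items.map (fun p => (p.1, altNodeTable p.2))
  if tables = [] then []
  else
    let width := (tables.map (fun t => t.2.length)).foldl max 0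
    let out := (List.range width).foldl (fun out i =>
        match altPick (tables.filterMap (fun t => t.2[i]?.map (·.1))) with
        | none => out
        | some nm => out.insert nm (PySem.Dict.ofList (tables.filterMap (fun t => t.2[i]?.map (fun c => (t.1, c.2))))))
      (PySem.Dict.empty : PySem.Dict String (PySem.Dict String (List String)))
    out.items.map (fun p => (p.1, p.2.items))

-- ===== PRECONDITION & SPEC =====
-- A raises ValueError on any line with two or more '/', on any scenario directory name with two or
-- more '-', and from int() on timestamps it ends up comparing; since which timestamps A's int()
-- touches depends on the cross-node positional grouping, Pre_ conservatively requires every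
-- timestamp after '-' to be int-parsable — on the over-excluded inputs (a timestamp A never
-- compares, e.g. the only matching one in its column) A returns it verbatim and B returns the
-- SAME value (B's running-min also only calls int() on compared pairs).
def Pre_get_scenarios_files_py (results : List (String × String)) : Prop :=
  ∀ p ∈ (PySem.Dict.ofList results).items, ∀ line ∈ PySem.Str.splitlines (PySem.Str.rstrip p.2),
    PySem.Str.count line "/" ≤ 1 ∧
    (PySem.Str.isIn "/" line = true →
      PySem.Str.count (((PySem.Str.split? line "/").getD []).getD 0 "") "-" ≤ 1 ∧
      (PySem.Str.isIn "-" (((PySem.Str.split? line "/").getD []).getD 0 "") = true →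
        (PySem.Int.ofStr? (((PySem.Str.split? (((PySem.Str.split? line "/").getD []).getD 0 "") "-").getD []).getD 1 "")).isSome = true))
instance (results : List (String × String)) : Decidable (Pre_get_scenarios_files_py results) := by unfold Pre_get_scenarios_files_py; infer_instance

def pvWitness_get_scenarios_files_py : (List (String × String)) :=
  [("node1", "scen-10/f.log\nscen-3/g.log\n"), ("node2", "scen-3/f.log\nplain\n")]

def Spec_get_scenarios_files_py (results : List (String × String)) (out : List (String × List (String × List String))) : Prop := out = get_scenarios_files_py_alt results
instance (results : List (String × String)) (out : List (String × List (String × List String))) : Decidable (Spec_get_scenarios_files_py results out) := by unfold Spec_get_scenarios_files_py; infer_instance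

-- ===== CLAIM (what is proved, stated in full; the proofs are below) =====
def Claim_equal_get_scenarios_files_py : Prop := ∀ (results : List (String × String)), Dom_get_scenarios_files_py results → Pre_get_scenarios_files_py results → Spec_get_scenarios_files_py results (get_scenarios_files_py results)

-- ===== LEMMAS AND PROOFS =====

def pvDirOf (fp : String) : String := ((PySem.Str.split? fp "/").getD []).getD 0 ""
def pvMkOf (fp : String) : String :=
  "results/" ++ pvDirOf fp ++ "/" ++ ((PySem.Str.split? fp "/").getD []).getD 1 ""
def pvPairs (lines : List String) : List (String × String) :=
  (lines.filter (fun fp => PySem.Str.isIn "/" fp)).map (fun fp => (pvDirOf fp, pvMkOf fp))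
def pvTbl (lines : List String) : List (String × List String) :=
  (PySem.List.dedup ((pvPairs lines).map (·.1))).map
    (fun d => (d, ((pvPairs lines).filter (fun q => q.1 == d)).map (·.2)))

def pvColN (ts : List (String × List (String × List String))) (k : Nat) : List String :=
  ts.filterMap (fun t => t.2[k]?.map (·.1))
def pvColD (ts : List (String × List (String × List String))) (k : Nat) : List (String × List String) :=
  ts.filterMap (fun t => t.2[k]?.map (fun c => (t.1, c.2)))
def pvWid (ts : List (String × List (String × List String))) : Nat :=
  (ts.map (fun t => t.2.length)).foldl max 0
def pvStepN (T : List (String × List String)) (names : PySem.Dict Int (List String)) : PySem.Dict Int (List String) :=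
  (PySem.List.enumerate T 0).foldl (fun d q => d.modify q.1 [] (· ++ [q.2.1])) names
def pvStepD (id : String) (T : List (String × List String)) (data : PySem.Dict Int (PySem.Dict String (List String))) :
    PySem.Dict Int (PySem.Dict String (List String)) :=
  (PySem.List.enumerate T 0).foldl (fun d q => d.modify q.1 PySem.Dict.empty (·.insert id q.2.2)) data
def pvInv (ts : List (String × List (String × List String)))
    (names : PySem.Dict Int (List String)) (data : PySem.Dict Int (PySem.Dict String (List String))) : Prop :=
  names.keys = (List.range (pvWid ts)).map (fun (k : Nat) => (k : Int))
  ∧ (∀ k : Nat, names.getD (k : Int) [] = pvColN ts k)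
  ∧ (∀ k : Nat, data.getD (k : Int) PySem.Dict.empty = PySem.Dict.ofList (pvColD ts k))


def pvPreOf (nm : String) : String := ((PySem.Str.split? nm "-").getD []).getD 0 ""
def pvTsOf (nm : String) : String := ((PySem.Str.split? nm "-").getD []).getD 1 ""
def pvValid (names : List String) : List (String × String) :=
  (names.filter (fun nm => PySem.Str.isIn "-" nm)).map (fun nm => (pvPreOf nm, pvTsOf nm))
def pvKey (t : String) : Int := (PySem.Int.ofStr? t).getD 0
def pvGStep (st : Option String × Option String) (v : String × String) : Option String × Option String :=
  match st.1 with
  | none => (some v.1, pyUpdMin st.2 v.2)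
  | some p => if p ≠ v.1 then st else (some p, pyUpdMin st.2 v.2)
def pvMStep (m t : String) : String := if pvKey t < pvKey m then t else m


theorem pv_modify_pattern {κ ν : Type} [BEq κ] [LawfulBEq κ] (d : PySem.Dict κ ν) (k : κ) (dflt : ν) (f : ν → ν) :
    (let d1 := if d.contains k then d else d.insert k dflt;
     d1.insert k (f (d1.getD k dflt))) = d.modify k dflt f := by
  by_cases h : d.contains k = true
  · simp [h, PySem.Dict.modify]
  · simp only [Bool.not_eq_true] at h
    simp [h, PySem.Dict.modify, PySem.Dict.getD_insert_self, PySem.Dict.insert_insert_self,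
      PySem.Dict.getD_of_not_contains d dflt h]

theorem pv_getD_foldl_modify_gen {κ ν β : Type} [BEq κ] [LawfulBEq κ] (l : List β) (key : β → κ)
    (d0 : ν) (f : β → ν → ν) (d : PySem.Dict κ ν) (c : κ) :
    (l.foldl (fun d x => d.modify (key x) d0 (f x)) d).getD c d0
      = (l.filter (fun x => key x == c)).foldl (fun v x => f x v) (d.getD c d0) := by
  induction l generalizing d with
  | nil => rfl
  | cons x t ih =>
    simp only [List.foldl_cons, List.filter_cons]
    by_cases h : key x = c
    · subst h
      simp [ih, PySem.Dict.getD_modify_self]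
    · have hb : (key x == c) = false := by simp [h]
      simp [hb, ih, PySem.Dict.getD_modify_of_ne d d0 (f x) (Ne.symm h)]

theorem pv_enum_map {α β : Type} (f : α → β) (l : List α) (s : Int) :
    PySem.List.enumerate (l.map f) s = (PySem.List.enumerate l s).map (fun q => (q.1, f q.2)) := by
  induction l generalizing s with
  | nil => rfl
  | cons x t ih => simp [PySem.List.enumerate_cons, ih]

theorem pv_set_update_range (a b : Nat) :
    PySem.Set.update ((List.range a).map (fun (k : Nat) => (k : Int))) ((List.range b).map (fun (k : Nat) => (k : Int)))
      = (List.range (max a b)).map (fun (k : Nat) => (k : Int)) := by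
  induction b with
  | zero =>
    simp only [List.range_zero, List.map_nil, Nat.max_zero]
    rfl
  | succ n ih =>
    have hr : List.range (n+1) = List.range n ++ [n] := by simp [List.range_succ]
    unfold PySem.Set.update at ih ⊢
    rw [hr, List.map_append, List.foldl_append, ih]
    simp only [List.map_cons, List.map_nil, List.foldl_cons, List.foldl_nil]
    by_cases h : n < a
    · have h1 : max a (n+1) = a := by omega
      have h2 : max a n = a := by omega
      rw [h2, h1]
      have hmem' : (n : Int) ∈ (List.range a).map (fun (k : Nat) => (k : Int)) :=
        List.mem_map.mpr ⟨n, List.mem_range.mpr h, rfl⟩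
      have hmem : PySem.Set.contains ((List.range a).map (fun (k : Nat) => (k : Int))) (n : Int) = true := by
        unfold PySem.Set.contains
        exact List.elem_eq_true_of_mem hmem'
      rw [PySem.Set.add, if_pos hmem]
    · have h2 : max a n = n := by omega
      have h1 : max a (n+1) = n+1 := by omega
      rw [h2, h1]
      have hmem' : (n : Int) ∉ (List.range n).map (fun (k : Nat) => (k : Int)) := by
        intro hc
        obtain ⟨j, hj, hje⟩ := List.mem_map.mp hc
        have hje' : j = n := by exact_mod_cast hje
        have hj' : j < n := List.mem_range.mp hj
        omega
      have hmem : ¬ PySem.Set.contains ((List.range n).map (fun (k : Nat) => (k : Int))) (n : Int) = true := by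
        intro hc
        apply hmem'
        unfold PySem.Set.contains at hc
        exact List.mem_of_elem_eq_true hc
      rw [PySem.Set.add, if_neg hmem, List.range_succ]
      simp

theorem pv_nsd_eq (lines : List String) (d : PySem.Dict String (List String)) :
    lines.foldl pyAddFile d
      = (pvPairs lines).foldl (fun d p => d.modify p.1 [] (· ++ [p.2])) d := by
  have hstep : ∀ (d : PySem.Dict String (List String)) (fp : String),
      pyAddFile d fp = if PySem.Str.isIn "/" fp then d.modify (pvDirOf fp) [] (· ++ [pvMkOf fp]) else d := by
    intro d fp
    by_cases h : PySem.Str.isIn "/" fp = true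
    · simp only [pyAddFile, h, Bool.true_eq_false, if_false, if_true]
      exact pv_modify_pattern d (pvDirOf fp) [] (· ++ [pvMkOf fp])
    · simp only [Bool.not_eq_true] at h
      simp [pyAddFile, PySem.Str.isIn, PySem.Str.isIn] at h ⊢
      simp [h]
  calc lines.foldl pyAddFile d
      = lines.foldl (fun d fp => if PySem.Str.isIn "/" fp then d.modify (pvDirOf fp) [] (· ++ [pvMkOf fp]) else d) d := by
        exact List.foldl_ext _ _ _ (fun a b _ => hstep a b)
    _ = (lines.filter (fun fp => PySem.Str.isIn "/" fp)).foldl (fun d fp => d.modify (pvDirOf fp) [] (· ++ [pvMkOf fp])) d := by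
        exact PySem.List.foldl_if_eq_foldl_filter _ _ _ _
    _ = (pvPairs lines).foldl (fun d p => d.modify p.1 [] (· ++ [p.2])) d := by
        rw [pvPairs, List.foldl_map]

theorem pv_nsd_getD (lines : List String) (c : String) :
    (lines.foldl pyAddFile PySem.Dict.empty).getD c []
      = ((pvPairs lines).filter (fun q => q.1 == c)).map (·.2) := by
  rw [pv_nsd_eq]
  have := PySem.Dict.getD_foldl_modify_append (pvPairs lines) (PySem.Dict.empty : PySem.Dict String (List String)) c
  simpa using this

theorem pv_nsd_keys (lines : List String) :
    (lines.foldl pyAddFile PySem.Dict.empty).keys = PySem.List.dedup ((pvPairs lines).map (·.1)) := by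
  rw [pv_nsd_eq]
  have := PySem.Dict.keys_foldl_modify_key (pvPairs lines) (fun p => p.1) []
      (fun _ p v => v ++ [p.2]) (PySem.Dict.empty : PySem.Dict String (List String))
  simp only [PySem.List.dedup_eq_ofList]
  simpa [PySem.Dict.keys_empty, PySem.Set.ofList] using this

theorem pv_nsd_nodup (lines : List String) :
    (lines.foldl pyAddFile PySem.Dict.empty).keys.Nodup := by
  rw [pv_nsd_keys]
  simpa [PySem.List.dedup_eq_ofList] using PySem.Set.nodup_ofList ((pvPairs lines).map (·.1))

theorem pv_nsd_items (lines : List String) :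
    (lines.foldl pyAddFile PySem.Dict.empty).items = pvTbl lines := by
  rw [PySem.Dict.items_eq_map_keys _ (pv_nsd_nodup lines) [], pv_nsd_keys, pvTbl]
  refine List.map_congr_left ?_
  intro d _
  rw [pv_nsd_getD]

theorem pv_altNodeTable_eq (v : String) :
    altNodeTable v = pvTbl (PySem.Str.splitlines (PySem.Str.rstrip v)) := by
  have hp : (PySem.Str.splitlines (PySem.Str.rstrip v)).foldl (fun acc fp =>
      if PySem.Str.isIn "/" fp then
        let parts := (PySem.Str.split? fp "/").getD []
        acc ++ [(parts.getD 0 "", "results/" ++ parts.getD 0 "" ++ "/" ++ parts.getD 1 "")]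
      else acc) [] = pvPairs (PySem.Str.splitlines (PySem.Str.rstrip v)) := by
    have := PySem.List.foldl_append_if (fun fp => PySem.Str.isIn "/" fp)
      (fun fp => (pvDirOf fp, pvMkOf fp)) (PySem.Str.splitlines (PySem.Str.rstrip v)) []
    simpa [pvDirOf, pvMkOf, pvPairs] using this
  rw [altNodeTable, hp, pvTbl]


theorem pv_enum_shift {α : Type} (T : List α) (s : Int) :
    PySem.List.enumerate T (s + 1) = (PySem.List.enumerate T s).map (fun q => (q.1 + 1, q.2)) := by
  induction T generalizing s with
  | nil => rfl
  | cons x t ih =>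
    simp only [PySem.List.enumerate_cons, List.map_cons]
    rw [show s + 1 + 1 = (s + 1) + 1 by ring, ih (s + 1)]

theorem pv_enum_filter {α : Type} (T : List α) (k : Nat) :
    (PySem.List.enumerate T 0).filter (fun q => q.1 == (k : Int))
      = (T[k]?.map (fun c => ((k : Int), c))).toList := by
  induction T generalizing k with
  | nil => simp
  | cons x t ih =>
    have hz : (0 : Int) = 0 := rfl
    rw [show PySem.List.enumerate (x :: t) 0 = (0, x) :: PySem.List.enumerate t 1 from rfl,
      show (1 : Int) = 0 + 1 by ring, pv_enum_shift]
    cases k with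
    | zero =>
      simp only [List.filter_cons, Nat.cast_zero]
      have hhead : ((0 : Int) == (0 : Int)) = true := by decide
      simp only [hhead, if_true]
      have hrest : ((PySem.List.enumerate t 0).map (fun q => (q.1 + 1, q.2))).filter
          (fun q => q.1 == (0 : Int)) = [] := by
        rw [List.filter_eq_nil_iff]
        intro q hq
        simp only [List.mem_map] at hq
        obtain ⟨p, hp, rfl⟩ := hq
        rw [PySem.List.mem_enumerate_iff] at hp
        obtain ⟨j, hj, rfl⟩ := hp
        simp only [beq_iff_eq]
        omega
      rw [hrest]
      simp
    | succ m =>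
      simp only [List.filter_cons]
      have hhead : ((0 : Int) == ((m + 1 : Nat) : Int)) = false := by
        simp only [beq_eq_false_iff_ne, ne_eq]
        omega
      simp only [hhead, if_false, Bool.false_eq_true]
      rw [List.filter_map]
      have hpred : ∀ q ∈ PySem.List.enumerate t 0, ((fun q : Int × α => q.1 == ((m + 1 : Nat) : Int)) ∘ (fun q : Int × α => (q.1 + 1, q.2))) q
          = (fun q : Int × α => q.1 == ((m : Nat) : Int)) q := by
        intro q _
        rw [Bool.eq_iff_iff]
        simp only [Function.comp_apply, beq_iff_eq]
        omega
      rw [List.filter_congr hpred, ih m]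
      cases htm : t[m]? <;> simp [htm]

theorem pv_wid_append (ts : List (String × List (String × List String))) (t : String × List (String × List String)) :
    pvWid (ts ++ [t]) = max (pvWid ts) t.2.length := by
  simp [pvWid, List.foldl_append]

theorem pv_ofList_append {κ ν : Type} [BEq κ] (l : List (κ × ν)) (x : κ × ν) :
    PySem.Dict.ofList (l ++ [x]) = (PySem.Dict.ofList l).insert x.1 x.2 := by
  simp [PySem.Dict.ofList, PySem.Dict.update, List.foldl_append]

theorem pv_node_step (node : String × List String) (st : PySem.Dict Int (List String) × PySem.Dict Int (PySem.Dict String (List String))) :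
    pyNodeStep st node = (pvStepN (pvTbl node.2) st.1, pvStepD node.1 (pvTbl node.2) st.2) := by
  unfold pyNodeStep
  obtain ⟨n0, d0⟩ := st
  show (PySem.List.enumerate (node.2.foldl pyAddFile PySem.Dict.empty).keys 0).foldl _ (n0, d0) = _
  set nsd := node.2.foldl pyAddFile PySem.Dict.empty with hnsd
  have hkeys : nsd.keys = (pvTbl node.2).map (·.1) := by
    rw [PySem.Dict.keys, pv_nsd_items]
  rw [hkeys, pv_enum_map, List.foldl_map]
  have hcongr : ∀ (st : PySem.Dict Int (List String) × PySem.Dict Int (PySem.Dict String (List String)))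
      (q : Int × (String × List String)), q ∈ PySem.List.enumerate (pvTbl node.2) 0 →
      (fun (st : PySem.Dict Int (List String) × PySem.Dict Int (PySem.Dict String (List String)))
           (p : Int × String) =>
        let names1 := if st.1.contains p.1 then st.1 else st.1.insert p.1 []
        let names2 := names1.insert p.1 (names1.getD p.1 [] ++ [p.2])
        let data1 := if st.2.contains p.1 then st.2 else st.2.insert p.1 PySem.Dict.empty
        let data2 := data1.insert p.1 ((data1.getD p.1 PySem.Dict.empty).insert node.1 (nsd.getD p.2 []))
        (names2, data2)) st ((fun q => (q.1, q.2.1)) q)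
      = (st.1.modify q.1 [] (· ++ [q.2.1]), st.2.modify q.1 PySem.Dict.empty (·.insert node.1 q.2.2)) := by
    intro st q hq
    have hgd : nsd.getD q.2.1 [] = q.2.2 := by
      rw [PySem.List.mem_enumerate_iff] at hq
      obtain ⟨j, hj, rfl⟩ := hq
      have hmem : ((pvTbl node.2)[j].1, (pvTbl node.2)[j].2) ∈ nsd.items := by
        rw [pv_nsd_items]
        exact List.getElem_mem hj
      exact PySem.Dict.getD_of_mem_items nsd hmem (pv_nsd_nodup node.2) []
    simp only [hgd]
    have h1 := pv_modify_pattern st.1 q.1 ([] : List String) (· ++ [q.2.1])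
    have h2 := pv_modify_pattern st.2 q.1 (PySem.Dict.empty : PySem.Dict String (List String)) (·.insert node.1 q.2.2)
    simp only at h1 h2
    simp only [h1, h2]
  refine (List.foldl_ext _ _ _ (fun a b hb => hcongr a b hb)).trans ?_
  exact PySem.List.foldl_prod_mk
    (f := fun (d : PySem.Dict Int (List String)) (q : Int × (String × List String)) => d.modify q.1 [] (· ++ [q.2.1]))
    (g := fun (d : PySem.Dict Int (PySem.Dict String (List String))) (q : Int × (String × List String)) => d.modify q.1 PySem.Dict.empty (·.insert node.1 q.2.2))
    (PySem.List.enumerate (pvTbl node.2) 0) n0 d0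

theorem pv_inv_step (ts : List (String × List (String × List String))) (id : String) (T : List (String × List String))
    (names : PySem.Dict Int (List String)) (data : PySem.Dict Int (PySem.Dict String (List String)))
    (h : pvInv ts names data) : pvInv (ts ++ [(id, T)]) (pvStepN T names) (pvStepD id T data) := by
  obtain ⟨hk, hn, hd⟩ := h
  refine ⟨?_, ?_, ?_⟩
  · have hkeys := PySem.Dict.keys_foldl_modify_key (PySem.List.enumerate T 0)
      (fun (q : Int × (String × List String)) => q.1) ([] : List String)
      (fun (_ : PySem.Dict Int (List String)) (q : Int × (String × List String)) (v : List String) => v ++ [q.2.1]) names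
    simp only at hkeys
    rw [pvStepN, hkeys, hk, PySem.List.map_fst_enumerate]
    have hpr : PySem.List.pyRange 0 (0 + (T.length : Int)) 1 = (List.range T.length).map (fun (k : Nat) => (k : Int)) := by
      rw [show (0 : Int) + (T.length : Int) = (T.length : Int) by ring]
      exact PySem.List.pyRange_zero_nat T.length
    rw [hpr, pv_set_update_range, pv_wid_append]
  · intro k
    have hg := pv_getD_foldl_modify_gen (PySem.List.enumerate T 0)
      (fun (q : Int × (String × List String)) => q.1) ([] : List String)
      (fun (q : Int × (String × List String)) (v : List String) => v ++ [q.2.1]) names ((k : Nat) : Int)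
    simp only at hg
    rw [pvStepN, hg, pv_enum_filter, hn k]
    have hcol : pvColN (ts ++ [(id, T)]) k = pvColN ts k ++ (T[k]?.map (·.1)).toList := by
      simp only [pvColN, List.filterMap_append]
      cases htk : T[k]? <;> simp [htk]
    rw [hcol]
    cases htk : T[k]? <;> simp [htk]
  · intro k
    have hg := pv_getD_foldl_modify_gen (PySem.List.enumerate T 0)
      (fun (q : Int × (String × List String)) => q.1) (PySem.Dict.empty : PySem.Dict String (List String))
      (fun (q : Int × (String × List String)) (v : PySem.Dict String (List String)) => v.insert id q.2.2) data ((k : Nat) : Int)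
    simp only at hg
    rw [pvStepD, hg, pv_enum_filter, hd k]
    have hcol : pvColD (ts ++ [(id, T)]) k = pvColD ts k ++ (T[k]?.map (fun c => (id, c.2))).toList := by
      simp only [pvColD, List.filterMap_append]
      cases htk : T[k]? <;> simp [htk]
    rw [hcol]
    cases htk : T[k]? <;> simp [htk, pv_ofList_append]

theorem pv_main (ns : List (String × List String)) (ts : List (String × List (String × List String)))
    (names : PySem.Dict Int (List String)) (data : PySem.Dict Int (PySem.Dict String (List String)))
    (h : pvInv ts names data) :
    pvInv (ts ++ ns.map (fun n => (n.1, pvTbl n.2)))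
      (ns.foldl pyNodeStep (names, data)).1 (ns.foldl pyNodeStep (names, data)).2 := by
  induction ns generalizing ts names data with
  | nil => simpa using h
  | cons n ns ih =>
    simp only [List.foldl_cons, List.map_cons]
    rw [pv_node_step n (names, data)]
    have := ih (ts ++ [(n.1, pvTbl n.2)]) (pvStepN (pvTbl n.2) names) (pvStepD n.1 (pvTbl n.2) data)
      (pv_inv_step ts n.1 (pvTbl n.2) names data h)
    simpa [List.append_assoc] using this

theorem pv_scan_valid (names : List String) :
    pyScan names = (pvValid names).foldl pvGStep (none, none) := by
  rw [pyScan]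
  have hstep : ∀ (st : Option String × Option String) (nm : String), nm ∈ names →
      (if PySem.Str.isIn "-" nm = false then st
       else
        let parts := (PySem.Str.split? nm "-").getD []
        let pre := parts.getD 0 ""
        let ts := parts.getD 1 ""
        match st.1 with
        | none => (some pre, pyUpdMin st.2 ts)
        | some p => if p ≠ pre then st else (some p, pyUpdMin st.2 ts))
      = (if PySem.Str.isIn "-" nm then pvGStep st (pvPreOf nm, pvTsOf nm) else st) := by
    intro st nm _
    by_cases h : PySem.Str.isIn "-" nm = true
    · simp only [h, Bool.true_eq_false, if_false, if_true]
      rfl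
    · simp only [Bool.not_eq_true] at h
      have h' : PySem.Chars.isIn ['-'] nm.toList = false := h
      simp [h']
  refine (List.foldl_ext _ _ _ (fun a b hb => hstep a b hb)).trans ?_
  rw [PySem.List.foldl_if_eq_foldl_filter (fun nm => PySem.Str.isIn "-" nm)
    (fun st nm => pvGStep st (pvPreOf nm, pvTsOf nm)), pvValid, List.foldl_map]

theorem pv_updmin_some (m t : String) : pyUpdMin (some m) t = some (pvMStep m t) := by
  simp only [pyUpdMin, pvMStep, pvKey, gt_iff_lt]
  split <;> rfl

theorem pv_gstep_run (vs : List (String × String)) (pre m : String) :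
    vs.foldl pvGStep (some pre, some m)
      = (some pre, some (((vs.filter (fun q => q.1 == pre)).map (·.2)).foldl pvMStep m)) := by
  induction vs generalizing m with
  | nil => rfl
  | cons v t ih =>
    simp only [List.foldl_cons, List.filter_cons]
    by_cases h : v.1 = pre
    · have hb : (v.1 == pre) = true := by simp [h]
      rw [show pvGStep (some pre, some m) v = (some pre, some (pvMStep m v.2)) by
        simp [pvGStep, h, pv_updmin_some]]
      rw [ih (pvMStep m v.2)]
      simp [hb]
    · have hb : (v.1 == pre) = false := by simp [h]
      rw [show pvGStep (some pre, some m) v = (some pre, some m) by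
        simp [pvGStep]; intro heq; exact absurd heq.symm h]
      rw [ih m]
      simp [hb]


theorem pv_scan_eq_pick (names : List String) :
    altPick names = (match pyScan names with
      | (none, _) => none
      | (some nm, mt) => some (nm ++ "-" ++ mt.getD "")) := by
  have hvalid : names.foldl (fun acc nm =>
      if PySem.Str.isIn "-" nm then
        let parts := (PySem.Str.split? nm "-").getD []
        acc ++ [(parts.getD 0 "", parts.getD 1 "")]
      else acc) [] = pvValid names := by
    have := PySem.List.foldl_append_if (fun nm => PySem.Str.isIn "-" nm)
      (fun nm => (pvPreOf nm, pvTsOf nm)) names []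
    simpa [pvValid, pvPreOf, pvTsOf] using this
  rw [pv_scan_valid]
  simp only [altPick]
  rw [hvalid]
  cases hv : pvValid names with
  | nil => rfl
  | cons v vs =>
    rw [List.foldl_cons, show pvGStep (none, none) v = (some v.1, some v.2) from rfl,
      pv_gstep_run vs v.1 v.2]
    have hmatched : (((v :: vs).filter (fun q => q.1 == v.1)).map (·.2))
        = v.2 :: ((vs.filter (fun q => q.1 == v.1)).map (·.2)) := by
      rw [List.filter_cons, if_pos (by simp : (v.1 == v.1) = true), List.map_cons]
    show some (v.1 ++ "-" ++ _) = some (v.1 ++ "-" ++ _)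
    rw [hmatched]
    simp only [List.tail_cons, List.headD_cons, Option.getD_some]
    rfl

theorem pv_range_cast_nodup (n : Nat) : ((List.range n).map (fun (k : Nat) => (k : Int))).Nodup :=
  (List.nodup_range).map (fun a b h => by exact_mod_cast h)

-- ===== VERDICT (by name: the statement is the Claim_ definition above) =====
theorem get_scenarios_files_py_spec : Claim_equal_get_scenarios_files_py := by
  intro results _ _
  unfold Spec_get_scenarios_files_py
  by_cases hnil : (PySem.Dict.ofList results).items = []
  · simp [get_scenarios_files_py, get_scenarios_files_py_alt, hnil]
  · have hinv := pv_main ((PySem.Dict.ofList results).items.map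
        (fun p => (p.1, PySem.Str.splitlines (PySem.Str.rstrip p.2)))) [] PySem.Dict.empty PySem.Dict.empty
      (by
        refine ⟨?_, ?_, ?_⟩
        · simp [pvWid, PySem.Dict.keys]
          rfl
        · intro k; simp [PySem.Dict.getD, PySem.Dict.get?, pvColN, PySem.Dict.empty]
        · intro k; simp [PySem.Dict.getD, PySem.Dict.get?, pvColD, PySem.Dict.empty, PySem.Dict.ofList, PySem.Dict.update])
    have hts : ((PySem.Dict.ofList results).items.map
        (fun p => (p.1, PySem.Str.splitlines (PySem.Str.rstrip p.2)))).map (fun n => (n.1, pvTbl n.2))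
        = (PySem.Dict.ofList results).items.map (fun p => (p.1, altNodeTable p.2)) := by
      rw [List.map_map]
      exact List.map_congr_left (fun p _ => by simp [pv_altNodeTable_eq])
    rw [List.nil_append, hts] at hinv
    obtain ⟨hk, hn, hd⟩ := hinv
    set tables := (PySem.Dict.ofList results).items.map (fun p => (p.1, altNodeTable p.2)) with htables
    set stA := ((PySem.Dict.ofList results).items.map
        (fun p => (p.1, PySem.Str.splitlines (PySem.Str.rstrip p.2)))).foldl pyNodeStep
      ((PySem.Dict.empty : PySem.Dict Int (List String)), (PySem.Dict.empty : PySem.Dict Int (PySem.Dict String (List String)))) with hstA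
    have hitems1 : stA.1.items = (List.range (pvWid tables)).map (fun (k : Nat) => ((k : Int), pvColN tables k)) := by
      rw [PySem.Dict.items_eq_map_keys stA.1 (by rw [hk]; exact pv_range_cast_nodup _) [], hk, List.map_map]
      exact List.map_congr_left (fun k _ => by simp [hn k])
    have hwid : (tables.map (fun t => t.2.length)).foldl max 0 = pvWid tables := rfl
    have hfold : stA.1.items.foldl (pyEmit stA.2)
        (PySem.Dict.empty : PySem.Dict String (PySem.Dict String (List String)))
        = (List.range ((tables.map (fun t => t.2.length)).foldl max 0)).foldl (fun out i =>
        match altPick (tables.filterMap (fun t => t.2[i]?.map (·.1))) with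
        | none => out
        | some nm => out.insert nm (PySem.Dict.ofList (tables.filterMap (fun t => t.2[i]?.map (fun c => (t.1, c.2))))))
        (PySem.Dict.empty : PySem.Dict String (PySem.Dict String (List String))) := by
      rw [hwid, hitems1, List.foldl_map]
      refine List.foldl_ext _ _ _ (fun out k _ => ?_)
      have hcol : tables.filterMap (fun t => t.2[k]?.map (·.1)) = pvColN tables k := rfl
      have hcold : tables.filterMap (fun t => t.2[k]?.map (fun c => (t.1, c.2))) = pvColD tables k := rfl
      rw [hcol, hcold, pv_scan_eq_pick (pvColN tables k)]
      unfold pyEmit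
      rcases hsc : pyScan (pvColN tables k) with ⟨o1, o2⟩
      cases o1 with
      | none => rfl
      | some nm =>
        simp only
        rw [hd k]
    simp only [get_scenarios_files_py, get_scenarios_files_py_alt]
    rw [if_neg (by simpa using hnil), if_neg (by simpa using hnil)]
    rw [← htables, ← hstA, hfold]

-- the witness satisfies the domain and the precondition
theorem pv_witness_ok : Dom_get_scenarios_files_py pvWitness_get_scenarios_files_py
    ∧ Pre_get_scenarios_files_py pvWitness_get_scenarios_files_py := by decide
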